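-- pv_equiv track=rewrite | github.com/baiwan-chenhao/rewrite | leetcode_gen_week4.py | solve
-- ===== SOURCE A (Python) =====
-- from math import inf, lcm
-- from typing import List, Tuple
--
-- def solve(moveTime: List[List[int]]) -> int:
--     from heapq import heappop, heappush
--     n, m = len(moveTime), len(moveTime[0])
--     dis = [[inf] * m for _ in range(n)]
--     dis[0][0] = 0
--     h = [(0, 0, 0)]
--     while True:
--         d, i, j = heappop(h)
--         if i == n - 1 and j == m - 1:
--             return d
--         if d > dis[i][j]:
--             continue
--         time = (i + j) % 2 + 1
--         for x, y in (i + 1, j), (i - 1, j), (i, j + 1), (i, j - 1):  # 枚举周围四个格子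
--             if 0 <= x < n and 0 <= y < m:
--                 new_dis = max(d, moveTime[x][y]) + time
--                 if new_dis < dis[x][y]:
--                     dis[x][y] = new_dis
--                     heappush(h, (new_dis, x, y))
-- ===== SOURCE B (Python) =====
-- def solve(moveTime):
--     n, m = len(moveTime), len(moveTime[0])
--     INF = float('inf')
--     dis = [[INF] * m for _ in range(n)]
--     dis[0][0] = 0
--     settled = [[False] * m for _ in range(n)]
--     while True:
--         best = None
--         for i in range(n):
--             for j in range(m):
--                 if not settled[i][j] and dis[i][j] != INF:
--                     cand = (dis[i][j], i, j)
--                     if best is None or cand < best: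
--                         best = cand
--         d, i, j = best
--         if i == n - 1 and j == m - 1:
--             return d
--         settled[i][j] = True
--         t = (i + j) % 2 + 1
--         for x, y in (i + 1, j), (i - 1, j), (i, j + 1), (i, j - 1):
--             if 0 <= x < n and 0 <= y < m:
--                 nd = max(d, moveTime[x][y]) + t
--                 if nd < dis[x][y]:
--                     dis[x][y] = nd
-- ===== Notes on version B (the rewrite author's own statement) =====
-- stated objective: alternative
-- what changed: Replaces the lazy-deletion binary heap with classic dense Dijkstra: a settled matrix plus a full scan for the closest unsettled cell each round, so there is no priority queue and no stale-entry skipping.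
-- outside the precondition, e.g. on solve([[1, 9, 9], [2, 9], [1, 0, 1]]): A returns 8, B returns 8
import Mathlib
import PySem

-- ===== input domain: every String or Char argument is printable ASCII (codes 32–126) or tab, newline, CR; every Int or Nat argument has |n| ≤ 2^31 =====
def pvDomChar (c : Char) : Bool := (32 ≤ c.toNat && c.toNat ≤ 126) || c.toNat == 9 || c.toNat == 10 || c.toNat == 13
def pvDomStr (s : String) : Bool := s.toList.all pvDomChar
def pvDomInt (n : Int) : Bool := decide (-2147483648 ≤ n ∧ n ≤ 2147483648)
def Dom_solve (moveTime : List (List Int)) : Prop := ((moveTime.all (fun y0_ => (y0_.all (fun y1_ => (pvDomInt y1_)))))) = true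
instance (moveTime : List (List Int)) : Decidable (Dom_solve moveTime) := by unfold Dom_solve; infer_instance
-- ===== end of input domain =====

-- B replaces A's lazy-deletion binary-heap Dijkstra by classic dense Dijkstra (a settled
-- matrix and a full scan for the closest unsettled cell; no priority queue) — alternative
-- decomposition, same return value on Pre_.


-- ===== PORT A =====
-- shared low-level helpers: lexicographic order on (d, i, j) triples (Python's tuple <),
-- first-minimum extraction (the value heapq.heappop returns: the least tuple in the heap),
-- and 2-D list indexing/assignment (indices are guarded non-negative in both programs,
-- so `.toNat` with a default is exact here).
def pvLexLt (a b : Int × Int × Int) : Bool :=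
  decide (a.1 < b.1 ∨ (a.1 = b.1 ∧ (a.2.1 < b.2.1 ∨ (a.2.1 = b.2.1 ∧ a.2.2 < b.2.2))))

def pvPopMin (l : List (Int × Int × Int)) :
    Option ((Int × Int × Int) × List (Int × Int × Int)) :=
  match l with
  | [] => none
  | a :: t =>
    let mn := t.foldl (fun acc x => if pvLexLt x acc then x else acc) a
    some (mn, (a :: t).erase mn)

def pvGet2 {α : Type} (g : List (List α)) (d : α) (i j : Int) : α :=
  (g.getD i.toNat []).getD j.toNat d

def pvSet2 {α : Type} (g : List (List α)) (i j : Int) (v : α) : List (List α) :=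
  g.set i.toNat ((g.getD i.toNat []).set j.toNat v)

def pvNbrs (i j : Int) : List (Int × Int) := [(i + 1, j), (i - 1, j), (i, j + 1), (i, j - 1)]

-- one relaxation step of A: guard, new_dis = max(d, moveTime[x][y]) + time, push + update
def pvRelaxA (n m : Int) (mt : List (List Int)) (d tme : Int)
    (st : List (Int × Int × Int) × List (List (Option Int))) (xy : Int × Int) :
    List (Int × Int × Int) × List (List (Option Int)) :=
  if 0 ≤ xy.1 ∧ xy.1 < n ∧ 0 ≤ xy.2 ∧ xy.2 < m then
    let nd := max d (pvGet2 mt 0 xy.1 xy.2) + tme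
    match pvGet2 st.2 none xy.1 xy.2 with
    | none => ((nd, xy.1, xy.2) :: st.1, pvSet2 st.2 xy.1 xy.2 (some nd))
    | some cur =>
      if nd < cur then ((nd, xy.1, xy.2) :: st.1, pvSet2 st.2 xy.1 xy.2 (some nd)) else st
  else st

-- A's pop-and-skip phase: pop the least heap entry; return at the target (Python checks the
-- target BEFORE staleness), skip stale entries (d > dis[i][j]) by recursing on the shrunken
-- heap (the inner `continue` loop, here fuelled by the heap length), else hand back the
-- effective entry.  `none` = heap exhausted (Python's heappop raises there; outside Pre_).
def pvPopEff (n m : Int) :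
    Nat → List (Int × Int × Int) → List (List (Option Int)) →
    Option (Int ⊕ ((Int × Int × Int) × List (Int × Int × Int)))
  | 0, _, _ => none
  | k + 1, h, dis =>
    match pvPopMin h with
    | none => none
    | some (e, h') =>
      if e.2.1 = n - 1 ∧ e.2.2 = m - 1 then some (.inl e.1)
      else
        match pvGet2 dis none e.2.1 e.2.2 with
        | none => some (.inr (e, h'))
        | some cur => if cur < e.1 then pvPopEff n m k h' dis else some (.inr (e, h'))

def pvLoopA (n m : Int) (mt : List (List Int)) :
    Nat → List (Int × Int × Int) → List (List (Option Int)) → Int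
  | 0, _, _ => 0
  | f + 1, h, dis =>
    match pvPopEff n m h.length h dis with
    | none => 0
    | some (.inl d) => d
    | some (.inr (e, h')) =>
      let tme := PySem.Int.mod (e.2.1 + e.2.2) 2 + 1
      let st := (pvNbrs e.2.1 e.2.2).foldl (pvRelaxA n m mt e.1 tme) (h', dis)
      pvLoopA n m mt f st.1 st.2

def solve (moveTime : List (List Int)) : Int :=
  let n : Int := moveTime.length
  let m : Int := (moveTime.headD []).length
  let dis0 := pvSet2 (List.replicate n.toNat (List.replicate m.toNat (none : Option Int))) 0 0 (some 0)
  pvLoopA n m moveTime (n.toNat * m.toNat + 1) [(0, 0, 0)] dis0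

-- ===== PORT B =====
-- B keeps no queue: the row-major scan for the unsettled finite cell with the least
-- (dis, i, j) is the candidate list below followed by the same first-minimum fold.
def pvFrontier (n m : Int) (dis : List (List (Option Int))) (settled : List (List Bool)) :
    List (Int × Int × Int) :=
  (PySem.List.pyRange 0 n 1).flatMap fun i =>
    (PySem.List.pyRange 0 m 1).filterMap fun j =>
      if pvGet2 settled false i j then none
      else
        match pvGet2 dis none i j with
        | none => none
        | some v => some (v, i, j)

def pvRelaxB (n m : Int) (mt : List (List Int)) (d tme : Int)
    (dis : List (List (Option Int))) (xy : Int × Int) : List (List (Option Int)) :=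
  if 0 ≤ xy.1 ∧ xy.1 < n ∧ 0 ≤ xy.2 ∧ xy.2 < m then
    let nd := max d (pvGet2 mt 0 xy.1 xy.2) + tme
    match pvGet2 dis none xy.1 xy.2 with
    | none => pvSet2 dis xy.1 xy.2 (some nd)
    | some cur => if nd < cur then pvSet2 dis xy.1 xy.2 (some nd) else dis
  else dis

def pvLoopB (n m : Int) (mt : List (List Int)) :
    Nat → List (List (Option Int)) → List (List Bool) → Int
  | 0, _, _ => 0
  | f + 1, dis, settled =>
    match pvPopMin (pvFrontier n m dis settled) with
    | none => 0
    | some (e, _) =>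
      if e.2.1 = n - 1 ∧ e.2.2 = m - 1 then e.1
      else
        let settled' := pvSet2 settled e.2.1 e.2.2 true
        let tme := PySem.Int.mod (e.2.1 + e.2.2) 2 + 1
        pvLoopB n m mt f ((pvNbrs e.2.1 e.2.2).foldl (pvRelaxB n m mt e.1 tme) dis) settled'

def solve_alt (moveTime : List (List Int)) : Int :=
  let n : Int := moveTime.length
  let m : Int := (moveTime.headD []).length
  let dis0 := pvSet2 (List.replicate n.toNat (List.replicate m.toNat (none : Option Int))) 0 0 (some 0)
  let settled0 := List.replicate n.toNat (List.replicate m.toNat false)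
  pvLoopB n m moveTime (n.toNat * m.toNat + 1) dis0 settled0

-- ===== PRECONDITION & SPEC =====
-- Pre_ excludes grids that are empty, have an empty first row, or have any row shorter than
-- the first: there A generally raises IndexError; on the rare shorter-row grids whose short
-- cells are never relaxed A still returns (a value-dependent, not closed-form set) and B
-- returns the same value there.
def Pre_solve (moveTime : List (List Int)) : Prop :=
  moveTime ≠ [] ∧ (moveTime.headD []).length ≠ 0 ∧
    ∀ row ∈ moveTime, (moveTime.headD []).length ≤ row.length
instance (moveTime : List (List Int)) : Decidable (Pre_solve moveTime) := by
  unfold Pre_solve; infer_instance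

def pvWitness_solve : List (List Int) := [[0]]

def Spec_solve (moveTime : List (List Int)) (out : Int) : Prop := out = solve_alt moveTime
instance (moveTime : List (List Int)) (out : Int) : Decidable (Spec_solve moveTime out) := by
  unfold Spec_solve; infer_instance

-- ===== CLAIM (what is proved, stated in full; the proofs are below) =====
def Claim_equal_solve : Prop :=
  ∀ (moveTime : List (List Int)), Dom_solve moveTime → Pre_solve moveTime →
    Spec_solve moveTime (solve moveTime)


-- ===== LEMMAS AND PROOFS =====
-- pvDims g n m: the grid has exactly n rows of length m.
def pvDims {α : Type} (g : List (List α)) (n m : Int) : Prop :=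
  g.length = n.toNat ∧ ∀ row ∈ g, row.length = m.toNat

theorem pvDims_row {α : Type} {g : List (List α)} {n m : Int} (hd : pvDims g n m) {i : Nat}
    (hi : i < g.length) : (g.getD i []).length = m.toNat := by
  rw [List.getD_eq_getElem?_getD, List.getElem?_eq_getElem hi]
  exact hd.2 _ (List.getElem_mem hi)

theorem pvGet2_set2_self {α : Type} {g : List (List α)} {n m : Int} (hd : pvDims g n m) {i j : Int}
    (hi0 : 0 ≤ i) (hin : i < n) (hj0 : 0 ≤ j) (hjm : j < m) (d v : α) :
    pvGet2 (pvSet2 g i j v) d i j = v := by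
  have hi : i.toNat < g.length := by have := hd.1; omega
  have hj : j.toNat < (g.getD i.toNat []).length := by
    rw [pvDims_row hd hi]; omega
  unfold pvGet2 pvSet2
  simp only [List.getD_eq_getElem?_getD] at hj ⊢
  rw [List.getElem?_set_self (by simpa using hi)]
  simp [List.getElem?_set_self hj]

theorem pvGet2_set2_ne {α : Type} (g : List (List α)) (d : α) (i j i' j' : Int) (v : α)
    (hne : i.toNat ≠ i'.toNat ∨ j.toNat ≠ j'.toNat) :
    pvGet2 (pvSet2 g i j v) d i' j' = pvGet2 g d i' j' := by
  unfold pvGet2 pvSet2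
  simp only [List.getD_eq_getElem?_getD, List.getElem?_set]
  by_cases hii : i.toNat = i'.toNat
  · have hjj : j.toNat ≠ j'.toNat := by tauto
    rw [if_pos hii]
    by_cases hlt : i.toNat < g.length
    · rw [if_pos hlt, ← hii]
      simp [List.getElem?_set_ne hjj, List.getD_eq_getElem?_getD,
        List.getElem?_eq_getElem hlt]
    · rw [if_neg hlt, ← hii]
      simp [List.getElem?_eq_none (by omega : g.length ≤ i.toNat)]
  · rw [if_neg hii]

theorem pvDims_set2 {α : Type} {g : List (List α)} {n m : Int} (hd : pvDims g n m) {i j : Int}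
    (hi0 : 0 ≤ i) (hin : i < n) (hj0 : 0 ≤ j) (hjm : j < m) (v : α) :
    pvDims (pvSet2 g i j v) n m := by
  have hi : i.toNat < g.length := by have := hd.1; omega
  refine ⟨by simp [pvSet2, hd.1], ?_⟩
  intro row hrow
  rcases List.mem_or_eq_of_mem_set hrow with h | h
  · exact hd.2 _ h
  · subst h; rw [List.length_set]; exact pvDims_row hd hi

theorem pvGet2_replicate {α : Type} (d d0 : α) (a b : Nat) (i j : Int) :
    pvGet2 (List.replicate a (List.replicate b d0)) d i j =
      if i.toNat < a ∧ j.toNat < b then d0 else d := by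
  unfold pvGet2
  simp only [List.getD_eq_getElem?_getD, List.getElem?_replicate]
  by_cases hi : i.toNat < a
  · simp [hi]
    by_cases hj : j.toNat < b <;> simp [hj]
  · simp [hi]

theorem lexLt_irrefl (a : Int×Int×Int) : pvLexLt a a = false := by simp [pvLexLt]
theorem lexLe_lt_trans {a b c : Int×Int×Int} (h1 : pvLexLt b a = false) (h2 : pvLexLt b c = true) : pvLexLt a c = true := by
  simp only [pvLexLt, decide_eq_true_eq, decide_eq_false_iff_not] at *; omega
theorem lexLt_antisymm {a b : Int×Int×Int} (h1 : pvLexLt a b = false) (h2 : pvLexLt b a = false) : a = b := by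
  obtain ⟨a1,a2,a3⟩ := a; obtain ⟨b1,b2,b3⟩ := b
  simp only [pvLexLt, decide_eq_false_iff_not] at *
  simp only [Prod.mk.injEq]; omega

theorem lexLe_first {a b : Int×Int×Int} (h : pvLexLt a b = false) : b.1 ≤ a.1 := by
  simp only [pvLexLt, decide_eq_false_iff_not] at h; omega

theorem lexLt_false_of_fst_lt {a b : Int×Int×Int} (h : b.1 < a.1) : pvLexLt a b = false := by
  simp only [pvLexLt, decide_eq_false_iff_not]; omega

theorem pvFoldMin_mem (a : Int×Int×Int) (t : List (Int×Int×Int)) :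
    t.foldl (fun acc x => if pvLexLt x acc then x else acc) a ∈ a :: t := by
  induction t generalizing a with
  | nil => simp [List.foldl]
  | cons x t ih =>
    simp only [List.foldl]
    rcases List.mem_cons.mp (ih (if pvLexLt x a then x else a)) with h | h
    · by_cases hx : pvLexLt x a = true
      · rw [if_pos hx] at h ⊢; rw [h]; simp
      · rw [if_neg hx] at h ⊢; rw [h]; simp
    · exact List.mem_cons_of_mem _ (List.mem_cons_of_mem _ h)

theorem lexLt_trans {a b c : Int×Int×Int} (h1 : pvLexLt a b = true) (h2 : pvLexLt b c = true) : pvLexLt a c = true := by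
  simp only [pvLexLt, decide_eq_true_eq] at *; omega

theorem pvFoldMin_min (a : Int×Int×Int) (t : List (Int×Int×Int)) :
    ∀ e ∈ a :: t, pvLexLt e (t.foldl (fun acc x => if pvLexLt x acc then x else acc) a) = false := by
  induction t generalizing a with
  | nil => intro e he; simp at he; subst he; exact lexLt_irrefl e
  | cons x t ih =>
    intro e he
    simp only [List.foldl]
    by_cases hx : pvLexLt x a = true
    · rw [if_pos hx]
      have hxm : pvLexLt x (t.foldl (fun acc x => if pvLexLt x acc then x else acc) x) = false :=
        ih x x (by exact List.mem_cons_self ..)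
      rcases List.mem_cons.mp he with heq | he'
      · subst heq
        by_contra hc
        simp only [Bool.not_eq_false] at hc
        have := lexLt_trans hx hc
        rw [hxm] at this; exact Bool.noConfusion this
      · exact ih x e he'
    · rw [if_neg hx]
      have ham : pvLexLt a (t.foldl (fun acc x => if pvLexLt x acc then x else acc) a) = false :=
        ih a a (by exact List.mem_cons_self ..)
      rcases List.mem_cons.mp he with heq | he'
      · subst heq; exact ham
      · rcases List.mem_cons.mp he' with heq | he''
        · subst heq
          by_contra hc
          simp only [Bool.not_eq_false] at hc
          have := lexLe_lt_trans (by simpa using hx) hc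
          rw [ham] at this; exact Bool.noConfusion this
        · exact ih a e (List.mem_cons_of_mem _ he'')

theorem pvPopMin_none_iff (l : List (Int×Int×Int)) : pvPopMin l = none ↔ l = [] := by
  cases l <;> simp [pvPopMin]

theorem pvPopMin_spec {l l' : List (Int×Int×Int)} {mn : Int×Int×Int}
    (h : pvPopMin l = some (mn, l')) :
    mn ∈ l ∧ l' = l.erase mn ∧ ∀ e ∈ l, pvLexLt e mn = false := by
  cases l with
  | nil => simp [pvPopMin] at h
  | cons a t =>
    simp only [pvPopMin, Option.some.injEq, Prod.mk.injEq] at h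
    obtain ⟨h1, h2⟩ := h
    subst h1; subst h2
    exact ⟨pvFoldMin_mem a t, rfl, pvFoldMin_min a t⟩

-- The simulation invariant tying A's heap `h` to B's (dis, settled) state.
structure PvInv (n m : Int) (dis : List (List (Option Int))) (settled : List (List Bool))
    (h : List (Int × Int × Int)) : Prop where
  hn : 0 < n
  hm : 0 < m
  dimsDis : pvDims dis n m
  dimsSet : pvDims settled n m
  range : ∀ e ∈ h, 0 ≤ e.2.1 ∧ e.2.1 < n ∧ 0 ≤ e.2.2 ∧ e.2.2 < m
  lb : ∀ e ∈ h, ∃ v, pvGet2 dis none e.2.1 e.2.2 = some v ∧ v ≤ e.1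
  cover : ∀ i j, 0 ≤ i → i < n → 0 ≤ j → j < m → pvGet2 settled false i j = false →
    ∀ v, pvGet2 dis none i j = some v → (v, i, j) ∈ h
  stale : ∀ e ∈ h, pvGet2 settled false e.2.1 e.2.2 = true →
    ∃ v, pvGet2 dis none e.2.1 e.2.2 = some v ∧ v < e.1
  settledLe : ∀ i j, 0 ≤ i → i < n → 0 ≤ j → j < m → pvGet2 settled false i j = true →
    ∀ v, pvGet2 dis none i j = some v → ∀ e ∈ h, v ≤ e.1
  pw : h.Pairwise (fun e e' => e.2 = e'.2 → e.1 ≠ e'.1)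
  targetOpen : pvGet2 settled false (n - 1) (m - 1) = false
  settledFin : ∀ i j, 0 ≤ i → i < n → 0 ≤ j → j < m → pvGet2 settled false i j = true →
    ∃ v, pvGet2 dis none i j = some v

theorem pvInv_perm {n m : Int} {dis : List (List (Option Int))} {settled : List (List Bool)}
    {h h' : List (Int × Int × Int)} (hp : h.Perm h') (hi : PvInv n m dis settled h) :
    PvInv n m dis settled h' := by
  refine ⟨hi.hn, hi.hm, hi.dimsDis, hi.dimsSet, ?_, ?_, ?_, ?_, ?_, ?_, hi.targetOpen, hi.settledFin⟩
  · exact fun e he => hi.range e (hp.mem_iff.mpr he)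
  · exact fun e he => hi.lb e (hp.mem_iff.mpr he)
  · exact fun i j h1 h2 h3 h4 h5 v h6 => hp.mem_iff.mp (hi.cover i j h1 h2 h3 h4 h5 v h6)
  · exact fun e he => hi.stale e (hp.mem_iff.mpr he)
  · exact fun i j h1 h2 h3 h4 h5 v h6 e he => hi.settledLe i j h1 h2 h3 h4 h5 v h6 e (hp.mem_iff.mpr he)
  · exact (List.Perm.pairwise_iff (fun {x y} hr => fun (hq : y.2 = x.2) => (hr hq.symm).symm) hp).mp hi.pw

theorem pvMem_frontier {n m : Int} {dis : List (List (Option Int))} {settled : List (List Bool)}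
    (e : Int × Int × Int) :
    e ∈ pvFrontier n m dis settled ↔
      0 ≤ e.2.1 ∧ e.2.1 < n ∧ 0 ≤ e.2.2 ∧ e.2.2 < m ∧
        pvGet2 settled false e.2.1 e.2.2 = false ∧
        pvGet2 dis none e.2.1 e.2.2 = some e.1 := by
  simp only [pvFrontier, List.mem_flatMap, List.mem_filterMap, PySem.List.mem_pyRange_one]
  constructor
  · rintro ⟨i, ⟨hi0, hin⟩, j, ⟨hj0, hjm⟩, hopt⟩
    rcases hset : pvGet2 settled false i j with _ | _
    · rcases hd : pvGet2 dis none i j with _ | v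
      · rw [hset, hd] at hopt; simp at hopt
      · rw [hset, hd] at hopt
        simp only [Bool.false_eq_true, if_false, Option.some.injEq] at hopt
        subst hopt
        exact ⟨hi0, hin, hj0, hjm, hset, hd⟩
    · rw [hset] at hopt; simp at hopt
  · rintro ⟨h1, h2, h3, h4, h5, h6⟩
    refine ⟨e.2.1, ⟨h1, h2⟩, e.2.2, ⟨h3, h4⟩, ?_⟩
    rw [h5, h6]
    simp

theorem pvFrontier_subset {n m : Int} {dis : List (List (Option Int))}
    {settled : List (List Bool)} {h : List (Int × Int × Int)}
    (hi : PvInv n m dis settled h) :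
    ∀ e ∈ pvFrontier n m dis settled, e ∈ h := by
  intro e he
  obtain ⟨h1, h2, h3, h4, h5, h6⟩ := (pvMem_frontier e).mp he
  have := hi.cover e.2.1 e.2.2 h1 h2 h3 h4 h5 e.1 h6
  simpa using this

theorem pvFrontier_nil {n m : Int} {dis : List (List (Option Int))} {settled : List (List Bool)}
    {h : List (Int × Int × Int)} (hi : PvInv n m dis settled h) (hnil : h = []) :
    pvPopMin (pvFrontier n m dis settled) = none := by
  rw [pvPopMin_none_iff, List.eq_nil_iff_forall_not_mem]
  intro e he
  have := pvFrontier_subset hi e he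
  rw [hnil] at this
  simp at this

theorem pvFrontier_min {n m : Int} {dis : List (List (Option Int))} {settled : List (List Bool)}
    {h : List (Int × Int × Int)} {mn : Int × Int × Int} (hi : PvInv n m dis settled h)
    (hmem : mn ∈ h) (hminp : ∀ e ∈ h, pvLexLt e mn = false)
    (hmf : mn ∈ pvFrontier n m dis settled) :
    ∃ r, pvPopMin (pvFrontier n m dis settled) = some (mn, r) := by
  rcases hpf : pvPopMin (pvFrontier n m dis settled) with _ | ⟨⟨mnB, r⟩⟩
  · rw [pvPopMin_none_iff] at hpf
    rw [hpf] at hmf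
    simp at hmf
  · obtain ⟨hBmem, _, hBmin⟩ := pvPopMin_spec hpf
    have h1 := hBmin mn hmf
    have h2 := hminp mnB (pvFrontier_subset hi mnB hBmem)
    have heq := lexLt_antisymm h1 h2
    subst heq
    exact ⟨r, rfl⟩

theorem pvInv_erase_stale {n m : Int} {dis : List (List (Option Int))}
    {settled : List (List Bool)} {h : List (Int × Int × Int)} {mn : Int × Int × Int} {v : Int}
    (hi : PvInv n m dis settled h) (hmem : mn ∈ h)
    (hv : pvGet2 dis none mn.2.1 mn.2.2 = some v) (hlt : v < mn.1) :
    PvInv n m dis settled (h.erase mn) := by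
  refine ⟨hi.hn, hi.hm, hi.dimsDis, hi.dimsSet,
    fun e he => hi.range e (List.mem_of_mem_erase he),
    fun e he => hi.lb e (List.mem_of_mem_erase he),
    ?_,
    fun e he => hi.stale e (List.mem_of_mem_erase he),
    fun i j h1 h2 h3 h4 h5 w h6 e he => hi.settledLe i j h1 h2 h3 h4 h5 w h6 e (List.mem_of_mem_erase he),
    List.Pairwise.sublist List.erase_sublist hi.pw,
    hi.targetOpen, hi.settledFin⟩
  intro i j h1 h2 h3 h4 h5 w h6
  have hmemw := hi.cover i j h1 h2 h3 h4 h5 w h6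
  have hne : (w, i, j) ≠ mn := by
    intro heq
    have hi2 : i = mn.2.1 := by rw [← heq]
    have hj2 : j = mn.2.2 := by rw [← heq]
    have hw2 : w = mn.1 := by rw [← heq]
    rw [hi2, hj2, hv] at h6
    simp only [Option.some.injEq] at h6
    omega
  exact (List.mem_erase_of_ne hne).mpr hmemw

-- the select lemma: A's pop-and-skip phase agrees with B's frontier minimum
theorem pvSelect_eq {n m : Int} {dis : List (List (Option Int))} {settled : List (List Bool)}
    (k : Nat) (h : List (Int × Int × Int)) (hk : h.length ≤ k)
    (hi : PvInv n m dis settled h) :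
    (pvPopEff n m k h dis = none ∧ pvPopMin (pvFrontier n m dis settled) = none) ∨
    (∃ d r, pvPopEff n m k h dis = some (.inl d) ∧
      pvPopMin (pvFrontier n m dis settled) = some ((d, n - 1, m - 1), r)) ∨
    (∃ e h' r, pvPopEff n m k h dis = some (.inr (e, h')) ∧
      pvPopMin (pvFrontier n m dis settled) = some (e, r) ∧
      ¬(e.2.1 = n - 1 ∧ e.2.2 = m - 1) ∧
      PvInv n m dis settled (e :: h') ∧
      (∀ e' ∈ e :: h', pvLexLt e' e = false) ∧
      pvGet2 dis none e.2.1 e.2.2 = some e.1 ∧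
      pvGet2 settled false e.2.1 e.2.2 = false) := by
  induction k generalizing h with
  | zero =>
    have hnil : h = [] := List.length_eq_zero_iff.mp (Nat.le_zero.mp hk)
    subst hnil
    exact Or.inl ⟨rfl, pvFrontier_nil hi rfl⟩
  | succ k ih =>
    rcases hpm : pvPopMin h with _ | ⟨⟨mn, h'⟩⟩
    · have hnil := (pvPopMin_none_iff h).mp hpm
      subst hnil
      exact Or.inl ⟨by simp [pvPopEff, pvPopMin], pvFrontier_nil hi rfl⟩
    · obtain ⟨hmem, herase, hminp⟩ := pvPopMin_spec hpm
      obtain ⟨v, hv, hvle⟩ := hi.lb mn hmem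
      obtain ⟨hx0, hxn, hy0, hym⟩ := hi.range mn hmem
      by_cases htgt : mn.2.1 = n - 1 ∧ mn.2.2 = m - 1
      · -- target popped
        have hsettled : pvGet2 settled false mn.2.1 mn.2.2 = false := by
          rw [htgt.1, htgt.2]; exact hi.targetOpen
        have hvm : (v, mn.2.1, mn.2.2) ∈ h := hi.cover _ _ hx0 hxn hy0 hym hsettled v hv
        have hveq : v = mn.1 := by
          have := lexLe_first (hminp _ hvm)
          simp only at this
          omega
        have hmf : mn ∈ pvFrontier n m dis settled :=
          (pvMem_frontier mn).mpr ⟨hx0, hxn, hy0, hym, hsettled, by rw [hv, hveq]⟩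
        obtain ⟨r, hpf⟩ := pvFrontier_min hi hmem hminp hmf
        refine Or.inr (Or.inl ⟨mn.1, r, ?_, ?_⟩)
        · simp [pvPopEff, hpm, htgt]
        · rw [hpf]
          congr 1
          obtain ⟨d0, ij⟩ := mn
          obtain ⟨i0, j0⟩ := ij
          simp only at htgt
          rw [htgt.1, htgt.2]
      · -- not the target
        by_cases hstale : v < mn.1
        · -- stale entry: skipped
          have hi' : PvInv n m dis settled (h.erase mn) := pvInv_erase_stale hi hmem hv hstale
          have hlen : (h.erase mn).length ≤ k := by
            rw [List.length_erase_of_mem hmem]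
            have : 1 ≤ h.length := List.length_pos_iff.mpr (List.ne_nil_of_mem hmem)
            omega
          have hstep : pvPopEff n m (k + 1) h dis = pvPopEff n m k (h.erase mn) dis := by
            simp [pvPopEff, hpm, htgt, hv, hstale, herase]
          rw [hstep]
          exact ih (h.erase mn) hlen hi'
        · -- effective pop
          have hveq : v = mn.1 := by omega
          have huns : pvGet2 settled false mn.2.1 mn.2.2 = false := by
            by_contra hc
            rw [Bool.not_eq_false] at hc
            obtain ⟨w, hw, hwlt⟩ := hi.stale mn hmem hc
            rw [hv] at hw
            simp only [Option.some.injEq] at hw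
            omega
          have hmf : mn ∈ pvFrontier n m dis settled :=
            (pvMem_frontier mn).mpr ⟨hx0, hxn, hy0, hym, huns, by rw [hv, hveq]⟩
          obtain ⟨r, hpf⟩ := pvFrontier_min hi hmem hminp hmf
          have hperm : h.Perm (mn :: h.erase mn) := List.perm_cons_erase hmem
          refine Or.inr (Or.inr ⟨mn, h.erase mn, r, ?_, hpf, htgt, pvInv_perm hperm hi, ?_, ?_, huns⟩)
          · have : ¬ v < mn.1 := hstale
            simp [pvPopEff, hpm, htgt, hv, this, herase]
          · intro e' he'
            exact hminp e' (hperm.mem_iff.mpr he')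
          · rw [hv, hveq]

-- the state threaded through the relaxation fold
structure PvQ (n m : Int) (eb : Int × Int × Int) (dis : List (List (Option Int)))
    (settled : List (List Bool)) (h : List (Int × Int × Int)) : Prop where
  inv : PvInv n m dis settled h
  minb : ∀ e' ∈ h, pvLexLt e' eb = false
  settledLeBase : ∀ i j, 0 ≤ i → i < n → 0 ≤ j → j < m → pvGet2 settled false i j = true →
    ∀ v, pvGet2 dis none i j = some v → v ≤ eb.1

theorem pvRelaxAB {n m : Int} {mt : List (List Int)} {d tme : Int}
    {h : List (Int × Int × Int)} {dis : List (List (Option Int))} (xy : Int × Int) :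
    (pvRelaxA n m mt d tme (h, dis) xy).2 = pvRelaxB n m mt d tme dis xy := by
  unfold pvRelaxA pvRelaxB
  split
  · cases pvGet2 dis none xy.1 xy.2 <;> simp <;> split <;> rfl
  · rfl

theorem pvPush_inv {n m : Int} {eb : Int × Int × Int}
    {h : List (Int × Int × Int)} {dis : List (List (Option Int))} {settled : List (List Bool)}
    (hq : PvQ n m eb dis settled h) {x y nd : Int}
    (hx0 : 0 ≤ x) (hxn : x < n) (hy0 : 0 ≤ y) (hym : y < m) (hnd : eb.1 < nd)
    (hup : pvGet2 dis none x y = none ∨ ∃ cur, pvGet2 dis none x y = some cur ∧ nd < cur) :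
    PvQ n m eb (pvSet2 dis x y (some nd)) settled ((nd, x, y) :: h) := by
  have hi := hq.inv
  have hxyuns : pvGet2 settled false x y = false := by
    by_contra hc
    rw [Bool.not_eq_false] at hc
    obtain ⟨w, hw⟩ := hi.settledFin x y hx0 hxn hy0 hym hc
    rcases hup with hnone | ⟨cur, hcur, hltc⟩
    · rw [hnone] at hw; exact absurd hw (by simp)
    · have hle := hq.settledLeBase x y hx0 hxn hy0 hym hc cur hcur
      omega
  have hold : ∀ e' ∈ h, e'.2.1 = x → e'.2.2 = y → nd < e'.1 := by
    intro e' he' hex hey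
    rcases hup with hnone | ⟨cur, hcur, hltc⟩
    · obtain ⟨v, hv, _⟩ := hi.lb e' he'
      rw [hex, hey, hnone] at hv
      exact absurd hv (by simp)
    · obtain ⟨v, hv, hvle⟩ := hi.lb e' he'
      rw [hex, hey, hcur] at hv
      simp only [Option.some.injEq] at hv
      omega
  have hget_self : pvGet2 (pvSet2 dis x y (some nd)) none x y = some nd :=
    pvGet2_set2_self hi.dimsDis hx0 hxn hy0 hym none (some nd)
  have hget_ne : ∀ i' j' : Int, i'.toNat ≠ x.toNat ∨ j'.toNat ≠ y.toNat →
      pvGet2 (pvSet2 dis x y (some nd)) none i' j' = pvGet2 dis none i' j' := by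
    intro i' j' hne
    exact pvGet2_set2_ne _ _ _ _ _ _ _ (by tauto)
  refine ⟨⟨hi.hn, hi.hm, pvDims_set2 hi.dimsDis hx0 hxn hy0 hym _, hi.dimsSet,
    ?_, ?_, ?_, ?_, ?_, ?_, hi.targetOpen, ?_⟩, ?_, ?_⟩
  · -- range
    intro e' he'
    rcases List.mem_cons.mp he' with heq | hm'
    · subst heq; exact ⟨hx0, hxn, hy0, hym⟩
    · exact hi.range e' hm'
  · -- lb
    intro e' he'
    rcases List.mem_cons.mp he' with heq | hm'
    · subst heq; exact ⟨nd, hget_self, le_refl nd⟩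
    · obtain ⟨h1, h2, h3, h4⟩ := hi.range e' hm'
      by_cases hij : e'.2.1 = x ∧ e'.2.2 = y
      · obtain ⟨hex, hey⟩ := hij
        have := hold e' hm' hex hey
        exact ⟨nd, by rw [hex, hey]; exact hget_self, by omega⟩
      · have hne : e'.2.1.toNat ≠ x.toNat ∨ e'.2.2.toNat ≠ y.toNat := by omega
        rw [hget_ne _ _ hne]
        exact hi.lb e' hm'
  · -- cover
    intro i' j' h1 h2 h3 h4 h5 v h6
    by_cases hij : i' = x ∧ j' = y
    · obtain ⟨rfl, rfl⟩ := hij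
      rw [hget_self] at h6
      simp only [Option.some.injEq] at h6
      subst h6
      exact List.mem_cons_self ..
    · have hne : i'.toNat ≠ x.toNat ∨ j'.toNat ≠ y.toNat := by omega
      rw [hget_ne _ _ hne] at h6
      exact List.mem_cons_of_mem _ (hi.cover i' j' h1 h2 h3 h4 h5 v h6)
  · -- stale
    intro e' he' hs
    rcases List.mem_cons.mp he' with heq | hm'
    · subst heq
      simp only at hs
      rw [hxyuns] at hs
      exact Bool.noConfusion hs
    · obtain ⟨h1, h2, h3, h4⟩ := hi.range e' hm'
      by_cases hij : e'.2.1 = x ∧ e'.2.2 = y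
      · obtain ⟨hex, hey⟩ := hij
        rw [hex, hey, hxyuns] at hs
        exact Bool.noConfusion hs
      · have hne : e'.2.1.toNat ≠ x.toNat ∨ e'.2.2.toNat ≠ y.toNat := by omega
        rw [hget_ne _ _ hne]
        exact hi.stale e' hm' hs
  · -- settledLe
    intro i' j' h1 h2 h3 h4 h5 v h6 e' he'
    have hij : ¬(i' = x ∧ j' = y) := by
      rintro ⟨rfl, rfl⟩
      rw [hxyuns] at h5
      exact Bool.noConfusion h5
    have hne : i'.toNat ≠ x.toNat ∨ j'.toNat ≠ y.toNat := by omega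
    rw [hget_ne _ _ hne] at h6
    rcases List.mem_cons.mp he' with heq | hm'
    · subst heq
      have := hq.settledLeBase i' j' h1 h2 h3 h4 h5 v h6
      simp only
      omega
    · exact hi.settledLe i' j' h1 h2 h3 h4 h5 v h6 e' hm'
  · -- pw
    rw [List.pairwise_cons]
    refine ⟨?_, hi.pw⟩
    intro e' he' heq2
    have hex : e'.2.1 = x := by rw [← heq2]
    have hey : e'.2.2 = y := by rw [← heq2]
    have hlt := hold e' he' hex hey
    omega
  · -- settledFin
    intro i' j' h1 h2 h3 h4 h5
    have hij : ¬(i' = x ∧ j' = y) := by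
      rintro ⟨rfl, rfl⟩
      rw [hxyuns] at h5
      exact Bool.noConfusion h5
    have hne : i'.toNat ≠ x.toNat ∨ j'.toNat ≠ y.toNat := by omega
    rw [hget_ne _ _ hne]
    exact hi.settledFin i' j' h1 h2 h3 h4 h5
  · -- minb
    intro e' he'
    rcases List.mem_cons.mp he' with heq | hm'
    · subst heq
      exact lexLt_false_of_fst_lt hnd
    · exact hq.minb e' hm'
  · -- settledLeBase
    intro i' j' h1 h2 h3 h4 h5 v h6
    have hij : ¬(i' = x ∧ j' = y) := by
      rintro ⟨rfl, rfl⟩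
      rw [hxyuns] at h5
      exact Bool.noConfusion h5
    have hne : i'.toNat ≠ x.toNat ∨ j'.toNat ≠ y.toNat := by omega
    rw [hget_ne _ _ hne] at h6
    exact hq.settledLeBase i' j' h1 h2 h3 h4 h5 v h6

theorem pvRelax_step {n m : Int} {mt : List (List Int)} {eb : Int × Int × Int} {tme : Int}
    {h : List (Int × Int × Int)} {dis : List (List (Option Int))} {settled : List (List Bool)}
    (hq : PvQ n m eb dis settled h) (htme : 1 ≤ tme) (xy : Int × Int) :
    PvQ n m eb (pvRelaxA n m mt eb.1 tme (h, dis) xy).2 settled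
      (pvRelaxA n m mt eb.1 tme (h, dis) xy).1 := by
  unfold pvRelaxA
  split
  · rename_i hb
    obtain ⟨hx0, hxn, hy0, hym⟩ := hb
    have hnd : eb.1 < max eb.1 (pvGet2 mt 0 xy.1 xy.2) + tme := by
      have := le_max_left eb.1 (pvGet2 mt 0 xy.1 xy.2)
      omega
    rcases hcur : pvGet2 dis none xy.1 xy.2 with _ | cur
    · simp only
      exact pvPush_inv hq hx0 hxn hy0 hym hnd (Or.inl hcur)
    · simp only
      split
      · rename_i hlt
        exact pvPush_inv hq hx0 hxn hy0 hym hnd (Or.inr ⟨cur, hcur, hlt⟩)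
      · exact hq
  · exact hq

theorem pvRelax_fold {n m : Int} {mt : List (List Int)} {eb : Int × Int × Int} {tme : Int}
    (xys : List (Int × Int)) {h : List (Int × Int × Int)} {dis : List (List (Option Int))}
    {settled : List (List Bool)} (hq : PvQ n m eb dis settled h) (htme : 1 ≤ tme) :
    PvQ n m eb (xys.foldl (pvRelaxA n m mt eb.1 tme) (h, dis)).2 settled
        (xys.foldl (pvRelaxA n m mt eb.1 tme) (h, dis)).1 ∧
      (xys.foldl (pvRelaxA n m mt eb.1 tme) (h, dis)).2 =
        xys.foldl (pvRelaxB n m mt eb.1 tme) dis := by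
  induction xys generalizing h dis with
  | nil => exact ⟨hq, rfl⟩
  | cons xy xys ih =>
    simp only [List.foldl]
    have hstep := pvRelax_step (mt := mt) hq htme xy
    have hAB := pvRelaxAB (n := n) (m := m) (mt := mt) (d := eb.1) (tme := tme)
      (h := h) (dis := dis) xy
    obtain ⟨hq', heq⟩ := ih hstep
    exact ⟨hq', by rw [← hAB]; exact heq⟩

-- settling the popped cell preserves the invariant
theorem pvSettle_init {n m : Int} {dis : List (List (Option Int))} {settled : List (List Bool)}
    {e : Int × Int × Int} {h' : List (Int × Int × Int)}
    (hi : PvInv n m dis settled (e :: h'))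
    (hmin : ∀ e' ∈ e :: h', pvLexLt e' e = false)
    (hd : pvGet2 dis none e.2.1 e.2.2 = some e.1)
    (hs : pvGet2 settled false e.2.1 e.2.2 = false)
    (hnt : ¬(e.2.1 = n - 1 ∧ e.2.2 = m - 1)) :
    PvQ n m e dis (pvSet2 settled e.2.1 e.2.2 true) h' := by
  obtain ⟨hi0, hin, hj0, hjm⟩ := hi.range e (List.mem_cons_self ..)
  have hsets : pvGet2 (pvSet2 settled e.2.1 e.2.2 true) false e.2.1 e.2.2 = true :=
    pvGet2_set2_self hi.dimsSet hi0 hin hj0 hjm false true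
  have hsetne : ∀ i' j' : Int, i'.toNat ≠ e.2.1.toNat ∨ j'.toNat ≠ e.2.2.toNat →
      pvGet2 (pvSet2 settled e.2.1 e.2.2 true) false i' j' = pvGet2 settled false i' j' := by
    intro i' j' hne
    exact pvGet2_set2_ne _ _ _ _ _ _ _ (by tauto)
  have hpw := hi.pw
  rw [List.pairwise_cons] at hpw
  refine ⟨⟨hi.hn, hi.hm, hi.dimsDis, pvDims_set2 hi.dimsSet hi0 hin hj0 hjm true,
    ?_, ?_, ?_, ?_, ?_, hpw.2, ?_, ?_⟩, ?_, ?_⟩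
  · exact fun e' he' => hi.range e' (List.mem_cons_of_mem _ he')
  · exact fun e' he' => hi.lb e' (List.mem_cons_of_mem _ he')
  · -- cover
    intro i' j' h1 h2 h3 h4 h5 v h6
    by_cases hij : i' = e.2.1 ∧ j' = e.2.2
    · obtain ⟨rfl, rfl⟩ := hij
      rw [hsets] at h5
      exact Bool.noConfusion h5
    · have hne : i'.toNat ≠ e.2.1.toNat ∨ j'.toNat ≠ e.2.2.toNat := by omega
      rw [hsetne _ _ hne] at h5
      have hmem := hi.cover i' j' h1 h2 h3 h4 h5 v h6
      rcases List.mem_cons.mp hmem with heq | hm'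
      · exfalso
        have : i' = e.2.1 ∧ j' = e.2.2 := by
          have h21 := congrArg (fun p => p.2.1) heq
          have h22 := congrArg (fun p => p.2.2) heq
          exact ⟨h21, h22⟩
        exact hij this
      · exact hm'
  · -- stale
    intro e' he' hs
    obtain ⟨h1', h2', h3', h4'⟩ := hi.range e' (List.mem_cons_of_mem _ he')
    by_cases hij : e'.2.1 = e.2.1 ∧ e'.2.2 = e.2.2
    · obtain ⟨hq1, hq2⟩ := hij
      refine ⟨e.1, by rw [hq1, hq2]; exact hd, ?_⟩
      have hne1 : e.1 ≠ e'.1 := hpw.1 e' he' (by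
        obtain ⟨x, y, z⟩ := e; obtain ⟨x', y', z'⟩ := e'
        simp_all)
      obtain ⟨v, hv, hvle⟩ := hi.lb e' (List.mem_cons_of_mem _ he')
      rw [hq1, hq2, hd] at hv
      simp only [Option.some.injEq] at hv
      omega
    · have hne : e'.2.1.toNat ≠ e.2.1.toNat ∨ e'.2.2.toNat ≠ e.2.2.toNat := by omega
      rw [hsetne _ _ hne] at hs
      exact hi.stale e' (List.mem_cons_of_mem _ he') hs
  · -- settledLe
    intro i' j' h1 h2 h3 h4 h5 v h6 e' he'
    by_cases hij : i' = e.2.1 ∧ j' = e.2.2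
    · obtain ⟨rfl, rfl⟩ := hij
      rw [hd] at h6
      simp only [Option.some.injEq] at h6
      subst h6
      exact lexLe_first (hmin e' (List.mem_cons_of_mem _ he'))
    · have hne : i'.toNat ≠ e.2.1.toNat ∨ j'.toNat ≠ e.2.2.toNat := by omega
      rw [hsetne _ _ hne] at h5
      exact hi.settledLe i' j' h1 h2 h3 h4 h5 v h6 e' (List.mem_cons_of_mem _ he')
  · -- targetOpen
    have hne : (n-1).toNat ≠ e.2.1.toNat ∨ (m-1).toNat ≠ e.2.2.toNat := by
      have hn := hi.hn; have hm := hi.hm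
      by_cases h1 : e.2.1 = n - 1
      · have h2 : e.2.2 ≠ m - 1 := fun hc => hnt ⟨h1, hc⟩
        omega
      · omega
    rw [hsetne _ _ hne]
    exact hi.targetOpen
  · -- settledFin
    intro i' j' h1 h2 h3 h4 h5
    by_cases hij : i' = e.2.1 ∧ j' = e.2.2
    · obtain ⟨rfl, rfl⟩ := hij
      exact ⟨e.1, hd⟩
    · have hne : i'.toNat ≠ e.2.1.toNat ∨ j'.toNat ≠ e.2.2.toNat := by omega
      rw [hsetne _ _ hne] at h5
      exact hi.settledFin i' j' h1 h2 h3 h4 h5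
  · -- minb
    exact fun e' he' => hmin e' (List.mem_cons_of_mem _ he')
  · -- settledLeBase
    intro i' j' h1 h2 h3 h4 h5 v h6
    by_cases hij : i' = e.2.1 ∧ j' = e.2.2
    · obtain ⟨rfl, rfl⟩ := hij
      rw [hd] at h6
      simp only [Option.some.injEq] at h6
      omega
    · have hne : i'.toNat ≠ e.2.1.toNat ∨ j'.toNat ≠ e.2.2.toNat := by omega
      rw [hsetne _ _ hne] at h5
      exact hi.settledLe i' j' h1 h2 h3 h4 h5 v h6 e (List.mem_cons_self ..)

theorem pvLoop_eq (n m : Int) (mt : List (List Int)) (f : Nat) :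
    ∀ (h : List (Int × Int × Int)) (dis : List (List (Option Int)))
      (settled : List (List Bool)), PvInv n m dis settled h →
      pvLoopA n m mt f h dis = pvLoopB n m mt f dis settled := by
  induction f with
  | zero => intro h dis settled _; rfl
  | succ f ih =>
    intro h dis settled hi
    rcases pvSelect_eq h.length h (le_refl _) hi with ⟨hA, hB⟩ | ⟨d, r, hA, hB⟩ |
      ⟨e, h', r, hA, hB, hnt, hi', hmin, hd, hs⟩
    · simp only [pvLoopA, pvLoopB, hA, hB]
    · simp only [pvLoopA, pvLoopB, hA, hB]
      simp
    · simp only [pvLoopA, pvLoopB, hA, hB]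
      rw [if_neg hnt]
      have htme : (1 : Int) ≤ PySem.Int.mod (e.2.1 + e.2.2) 2 + 1 := by
        have := PySem.Int.mod_nonneg (e.2.1 + e.2.2) (by norm_num : (0:Int) < 2)
        omega
      have hq0 := pvSettle_init hi' hmin hd hs hnt
      obtain ⟨hq, heq⟩ := pvRelax_fold (mt := mt) (pvNbrs e.2.1 e.2.2) hq0 htme
      rw [← heq]
      exact ih _ _ _ hq.inv

theorem pvInit (moveTime : List (List Int)) (hpre : Pre_solve moveTime) :
    PvInv (moveTime.length : Int) ((moveTime.headD []).length : Int)
      (pvSet2 (List.replicate (moveTime.length : Int).toNat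
        (List.replicate ((moveTime.headD []).length : Int).toNat (none : Option Int))) 0 0 (some 0))
      (List.replicate (moveTime.length : Int).toNat
        (List.replicate ((moveTime.headD []).length : Int).toNat false))
      [(0, 0, 0)] := by
  obtain ⟨hne, hm0, _⟩ := hpre
  have hn : (0 : Int) < (moveTime.length : Int) := by
    cases moveTime with
    | nil => exact absurd rfl hne
    | cons a t => simp
  have hm : (0 : Int) < ((moveTime.headD []).length : Int) := by
    omega
  set n : Int := (moveTime.length : Int)
  set m : Int := ((moveTime.headD []).length : Int)
  have hrep : pvDims (List.replicate n.toNat (List.replicate m.toNat (none : Option Int))) n m := by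
    refine ⟨by simp, ?_⟩
    intro row hrow
    rw [List.eq_of_mem_replicate hrow, List.length_replicate]
  have hrepb : pvDims (List.replicate n.toNat (List.replicate m.toNat false)) n m := by
    refine ⟨by simp, ?_⟩
    intro row hrow
    rw [List.eq_of_mem_replicate hrow, List.length_replicate]
  have hdis : pvDims (pvSet2 (List.replicate n.toNat (List.replicate m.toNat (none : Option Int))) 0 0 (some 0)) n m :=
    pvDims_set2 hrep (le_refl 0) hn (le_refl 0) hm _
  have hsetF : ∀ i j : Int, pvGet2 (List.replicate n.toNat (List.replicate m.toNat false)) false i j = false := by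
    intro i j
    rw [pvGet2_replicate]
    split <;> rfl
  have hget00 : pvGet2 (pvSet2 (List.replicate n.toNat (List.replicate m.toNat (none : Option Int))) 0 0 (some 0)) none 0 0 = some 0 :=
    pvGet2_set2_self hrep (le_refl 0) hn (le_refl 0) hm none (some 0)
  refine ⟨hn, hm, hdis, hrepb, ?_, ?_, ?_, ?_, ?_, ?_, hsetF _ _, ?_⟩
  · intro e he
    simp only [List.mem_singleton] at he
    subst he
    exact ⟨le_refl 0, hn, le_refl 0, hm⟩
  · intro e he
    simp only [List.mem_singleton] at he
    subst he
    exact ⟨0, hget00, le_refl 0⟩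
  · intro i j hi0 hin hj0 hjm _ v hv
    by_cases hij : i = 0 ∧ j = 0
    · obtain ⟨rfl, rfl⟩ := hij
      rw [hget00] at hv
      simp only [Option.some.injEq] at hv
      subst hv
      simp
    · rw [pvGet2_set2_ne _ _ _ _ _ _ _ (by omega)] at hv
      rw [pvGet2_replicate] at hv
      split at hv <;> simp at hv
  · intro e he hs
    rw [hsetF] at hs
    exact Bool.noConfusion hs
  · intro i j _ _ _ _ hs
    rw [hsetF] at hs
    exact Bool.noConfusion hs
  · simp
  · intro i j _ _ _ _ hs
    rw [hsetF] at hs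
    exact Bool.noConfusion hs

-- ===== VERDICT (by name: the statement is the Claim_ definition above) =====
theorem solve_spec : Claim_equal_solve := by
  intro moveTime _ hpre
  unfold Spec_solve solve solve_alt
  exact pvLoop_eq _ _ _ _ _ _ _ (pvInit moveTime hpre)
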